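-- pv_equiv track=rewrite | github.com/Jiajunnn/systolic_array | cmod/Systolic/SysTop/parse_datalifetime.py | compute_lifetimes
-- ===== SOURCE A (Python) =====
-- from collections import defaultdict
--
-- def compute_lifetimes(events):
--     bankaddr_events = defaultdict(list)
--
--     # 1) Group events by (bank, address)
--     for (ts, op, bank, addr) in events:
--         bankaddr_events[(bank, addr)].append((ts, op))
--
--     # 2) For each (bank, addr), compute lifetimes
--     lifetime_map = {}
--
--     for (bankaddr, ev_list) in bankaddr_events.items():
--         lifetimes = []
--         current_write_time = None
--         last_read_after_write = None
--
--         for (ts, op) in ev_list: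
--             if op == "Write":
--                 # Finalize previous write (if any) with the last read
--                 if current_write_time is not None:
--                     if last_read_after_write is not None and last_read_after_write > current_write_time:
--                         lifetime = last_read_after_write - current_write_time
--                         lifetimes.append(lifetime)
--                 # Start a new write
--                 current_write_time = ts
--                 last_read_after_write = None
--
--             elif op == "Read":
--                 if current_write_time is not None and ts > current_write_time:
--                     last_read_after_write = ts
--
--         # Finalize the very last write if it had any subsequent read
--         if current_write_time is not None and last_read_after_write is not None:
--             if last_read_after_write > current_write_time:
--                 lifetimes.append(last_read_after_write - current_write_time)
--
--         lifetime_map[bankaddr] = lifetimes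
--
--     return lifetime_map
-- ===== SOURCE B (Python) =====
-- from collections import defaultdict
--
--
-- def _segment_lifetimes(ev_list):
--     """Carve ev_list into write-delimited segments and reduce each one."""
--     lifetimes = []
--     n = len(ev_list)
--     # skip everything before the first write
--     i = 0
--     while i < n and ev_list[i][1] != "Write":
--         i += 1
--     while i < n:
--         wts = ev_list[i][0]
--         # segment runs up to (excluding) the next write
--         j = i + 1
--         while j < n and ev_list[j][1] != "Write":
--             j += 1
--         last = None
--         for ts, op in ev_list[i + 1:j]:
--             if op == "Read" and ts > wts:
--                 last = ts
--         if last is not None: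
--             lifetimes.append(last - wts)
--         i = j
--     return lifetimes
--
--
-- def compute_lifetimes(events):
--     # same grouping as before: dict keyed by (bank, address), insertion order
--     bankaddr_events = defaultdict(list)
--     for (ts, op, bank, addr) in events:
--         bankaddr_events[(bank, addr)].append((ts, op))
--     return {ba: _segment_lifetimes(evs) for ba, evs in bankaddr_events.items()}
-- ===== Notes on version B (the rewrite author's own statement) =====
-- stated objective: alternative
-- what changed: Per (bank,addr) group, the incremental 'finalize previous write' state machine (current_write_time/last_read_after_write carried across the loop) is replaced by an explicit partition of the event list into write-delimited segments, each reduced independently to its last qualifying read.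
import Mathlib
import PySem

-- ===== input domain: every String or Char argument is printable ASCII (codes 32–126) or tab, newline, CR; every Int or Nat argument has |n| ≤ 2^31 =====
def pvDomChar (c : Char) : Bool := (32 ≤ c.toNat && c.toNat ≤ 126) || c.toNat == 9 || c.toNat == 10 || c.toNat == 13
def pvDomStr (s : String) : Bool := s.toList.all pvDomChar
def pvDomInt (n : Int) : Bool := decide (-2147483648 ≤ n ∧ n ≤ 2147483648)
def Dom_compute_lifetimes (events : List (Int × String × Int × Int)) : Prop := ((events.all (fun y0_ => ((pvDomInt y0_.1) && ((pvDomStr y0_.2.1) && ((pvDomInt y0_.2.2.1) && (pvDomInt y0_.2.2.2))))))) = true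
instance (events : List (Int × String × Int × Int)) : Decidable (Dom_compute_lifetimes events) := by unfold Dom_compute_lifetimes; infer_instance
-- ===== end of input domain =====

-- B replaces A's incremental finalize-previous-write state machine by an explicit
-- partition of each group's event list into write-delimited segments, each reduced
-- independently (objective: alternative decomposition, same cost).

-- Shared grouping step (identical in both Pythons: defaultdict(list) keyed by (bank, addr))
def groupEvents (events : List (Int × String × Int × Int)) :
    PySem.Dict (Int × Int) (List (Int × String)) :=
  events.foldl
    (fun d e => d.modify (e.2.2.1, e.2.2.2) [] (· ++ [(e.1, e.2.1)]))
    PySem.Dict.empty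

-- ===== PORT A =====
-- A's inner loop: state (lifetimes, current_write_time, last_read_after_write)
def aStep (st : List Int × Option Int × Option Int) (e : Int × String) :
    List Int × Option Int × Option Int :=
  if e.2 == "Write" then
    let lifetimes :=
      match st.2.1, st.2.2 with
      | some cwt, some lra => if lra > cwt then st.1 ++ [lra - cwt] else st.1
      | _, _ => st.1
    (lifetimes, some e.1, none)
  else if e.2 == "Read" then
    match st.2.1 with
    | some cwt => if e.1 > cwt then (st.1, st.2.1, some e.1) else st
    | none => st
  else st

-- final "Finalize the very last write" step
def aFinal (st : List Int × Option Int × Option Int) : List Int :=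
  match st.2.1, st.2.2 with
  | some cwt, some lra => if lra > cwt then st.1 ++ [lra - cwt] else st.1
  | _, _ => st.1

def aLifetimes (evl : List (Int × String)) : List Int :=
  aFinal (evl.foldl aStep ([], none, none))

def compute_lifetimes (events : List (Int × String × Int × Int)) :
    List (Int × Int × List Int) :=
  let g := groupEvents events
  let m := g.items.foldl
    (fun m p => m.insert p.1 (aLifetimes p.2)) PySem.Dict.empty
  m.items.map (fun p => (p.1.1, p.1.2, p.2))

-- ===== PORT B =====
-- last read of the segment strictly after the write timestamp
def segLast (wts : Int) (lr : Option Int) (seg : List (Int × String)) : Option Int :=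
  seg.foldl (fun acc e => if e.2 == "Read" && wts < e.1 then some e.1 else acc) lr

-- write-delimited segments: skip to the first write, reduce the segment, recurse
def segLifetimes (l : List (Int × String)) : List Int :=
  match h : l.dropWhile (fun e => e.2 != "Write") with
  | [] => []
  | w :: rest =>
    (match segLast w.1 none (rest.takeWhile (fun e => e.2 != "Write")) with
     | some t => [t - w.1]
     | none => []) ++ segLifetimes (rest.dropWhile (fun e => e.2 != "Write"))
termination_by l.length
decreasing_by
  have h1 : (w :: rest).length ≤ l.length := h ▸ l.length_dropWhile_le _
  have h2 : (rest.dropWhile (fun e => e.2 != "Write")).length ≤ rest.length :=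
    rest.length_dropWhile_le _
  simp at h1; omega

def compute_lifetimes_alt (events : List (Int × String × Int × Int)) :
    List (Int × Int × List Int) :=
  (groupEvents events).items.map (fun p => (p.1.1, p.1.2, segLifetimes p.2))

-- ===== PRECONDITION & SPEC =====
def Spec_compute_lifetimes (events : List (Int × String × Int × Int)) (out : List (Int × Int × List Int)) : Prop := out = compute_lifetimes_alt events
instance (events : List (Int × String × Int × Int)) (out : List (Int × Int × List Int)) : Decidable (Spec_compute_lifetimes events out) := by unfold Spec_compute_lifetimes; infer_instance

-- ===== CLAIM (what is proved, stated in full; the proofs are below) =====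
def Claim_equal_compute_lifetimes : Prop := ∀ (events : List (Int × String × Int × Int)), Dom_compute_lifetimes events → Spec_compute_lifetimes events (compute_lifetimes events)

-- ===== LEMMAS AND PROOFS =====

-- A's finalize value, as B's check writes it
def emit (wts : Int) : Option Int → List Int
  | some t => if wts < t then [t - wts] else []
  | none => []

theorem segLast_bound (wts : Int) (seg : List (Int × String)) (lr : Option Int)
    (hlr : lr = none ∨ ∃ t, lr = some t ∧ wts < t) :
    segLast wts lr seg = none ∨ ∃ t, segLast wts lr seg = some t ∧ wts < t := by
  induction seg generalizing lr with
  | nil => simpa [segLast] using hlr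
  | cons e rest ih =>
    simp only [segLast, List.foldl_cons] at *
    by_cases hc : (e.2 == "Read" && decide (wts < e.1)) = true
    · rw [if_pos hc]
      simp only [Bool.and_eq_true, decide_eq_true_eq] at hc
      exact ih (some e.1) (Or.inr ⟨e.1, rfl, hc.2⟩)
    · rw [if_neg hc]; exact ih lr hlr

-- unfold segLifetimes when the head is a Write, rewriting the raw append into emit
theorem segLifetimes_of_dropWhile_nil (l : List (Int × String))
    (h : l.dropWhile (fun e => e.2 != "Write") = []) : segLifetimes l = [] := by
  rw [segLifetimes.eq_def]
  split
  · rfl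
  · next w rest heq => rw [h] at heq; cases heq

theorem segLifetimes_of_dropWhile_cons (l : List (Int × String)) (w : Int × String)
    (rest : List (Int × String))
    (h : l.dropWhile (fun e => e.2 != "Write") = w :: rest) :
    segLifetimes l =
      (match segLast w.1 none (rest.takeWhile (fun e => e.2 != "Write")) with
       | some t => [t - w.1]
       | none => []) ++ segLifetimes (rest.dropWhile (fun e => e.2 != "Write")) := by
  rw [segLifetimes.eq_def]
  split
  · next heq => rw [h] at heq; cases heq
  · next w' rest' heq =>
    rw [h] at heq
    injection heq with h1 h2
    subst h1; subst h2; rfl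

theorem segLifetimes_write (ts : Int) (rest : List (Int × String)) :
    segLifetimes ((ts, "Write") :: rest) =
      emit ts (segLast ts none (rest.takeWhile (fun e => e.2 != "Write"))) ++
        segLifetimes (rest.dropWhile (fun e => e.2 != "Write")) := by
  have hdw : ((ts, "Write") :: rest).dropWhile (fun e => e.2 != "Write") =
      (ts, "Write") :: rest := by simp [List.dropWhile_cons]
  rw [segLifetimes_of_dropWhile_cons _ _ _ hdw]
  rcases segLast_bound ts (rest.takeWhile (fun e => e.2 != "Write")) none (Or.inl rfl) with
    hn | ⟨t, hs, hlt⟩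
  · simp [hn, emit]
  · simp [hs, emit, hlt]

theorem segLifetimes_skip (ts : Int) (op : String) (rest : List (Int × String))
    (hnb : (op == "Write") = false) :
    segLifetimes ((ts, op) :: rest) = segLifetimes rest := by
  have hne : op ≠ "Write" := by simpa using hnb
  have hd : ((ts, op) :: rest).dropWhile (fun e => e.2 != "Write") =
      rest.dropWhile (fun e => e.2 != "Write") := by
    simp [List.dropWhile_cons, hnb, hne]
  cases hres : rest.dropWhile (fun e => e.2 != "Write") with
  | nil =>
    rw [segLifetimes_of_dropWhile_nil _ (hd.trans hres), segLifetimes_of_dropWhile_nil _ hres]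
  | cons w r =>
    rw [segLifetimes_of_dropWhile_cons _ _ _ (hd.trans hres),
        segLifetimes_of_dropWhile_cons _ _ _ hres]

-- the core invariant: A's state machine from a live write equals B's segment reduction
theorem stateL2 (l : List (Int × String)) (acc : List Int) (wts : Int) (lr : Option Int) :
    aFinal (l.foldl aStep (acc, some wts, lr)) =
      acc ++ emit wts (segLast wts lr (l.takeWhile (fun e => e.2 != "Write"))) ++
        segLifetimes (l.dropWhile (fun e => e.2 != "Write")) := by
  induction l generalizing acc wts lr with
  | nil =>
    cases lr with
    | none => simp [aFinal, emit, segLast, segLifetimes]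
    | some t =>
      by_cases hlt : wts < t
      · simp [aFinal, emit, segLast, segLifetimes, hlt]
      · simp [aFinal, emit, segLast, segLifetimes, hlt]
  | cons e rest ih =>
    obtain ⟨ts, op⟩ := e
    by_cases hw : op = "Write"
    · subst hw
      have hstep : aStep (acc, some wts, lr) (ts, "Write") =
          (acc ++ emit wts lr, some ts, none) := by
        cases lr with
        | none => simp [aStep, emit]
        | some t =>
          by_cases hlt : wts < t
          · simp [aStep, emit, hlt]
          · simp [aStep, emit, hlt]
      rw [List.foldl_cons, hstep, ih]
      have htw : ((ts, "Write") :: rest).takeWhile (fun e => e.2 != "Write") = [] := by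
        simp [List.takeWhile_cons]
      have hdw : ((ts, "Write") :: rest).dropWhile (fun e => e.2 != "Write") =
          (ts, "Write") :: rest := by simp [List.dropWhile_cons]
      rw [htw, hdw, segLifetimes_write]
      simp [segLast, List.append_assoc]
    · have hnb : (op == "Write") = false := by simpa using hw
      have htw : ((ts, op) :: rest).takeWhile (fun e => e.2 != "Write") =
          (ts, op) :: rest.takeWhile (fun e => e.2 != "Write") := by
        simp [List.takeWhile_cons, hnb, hw]
      have hdw : ((ts, op) :: rest).dropWhile (fun e => e.2 != "Write") =
          rest.dropWhile (fun e => e.2 != "Write") := by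
        simp [List.dropWhile_cons, hnb, hw]
      by_cases hr : op = "Read"
      · subst hr
        by_cases hlt : wts < ts
        · have hstep : aStep (acc, some wts, lr) (ts, "Read") =
              (acc, some wts, some ts) := by simp [aStep, hlt]
          rw [List.foldl_cons, hstep, ih, htw, hdw]
          simp [segLast, hlt]
        · have hstep : aStep (acc, some wts, lr) (ts, "Read") =
              (acc, some wts, lr) := by simp [aStep, hlt]
          rw [List.foldl_cons, hstep, ih, htw, hdw]
          simp [segLast, hlt]
      · have hstep : aStep (acc, some wts, lr) (ts, op) =
            (acc, some wts, lr) := by simp [aStep, hnb, hw, hr]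
        rw [List.foldl_cons, hstep, ih, htw, hdw]
        simp [segLast, hnb, hr]

-- before the first write A's state machine emits nothing
theorem stateL1 (l : List (Int × String)) (acc : List Int) :
    aFinal (l.foldl aStep (acc, none, none)) = acc ++ segLifetimes l := by
  induction l generalizing acc with
  | nil => simp [aFinal, segLifetimes]
  | cons e rest ih =>
    obtain ⟨ts, op⟩ := e
    by_cases hw : op = "Write"
    · subst hw
      have hstep : aStep (acc, none, none) (ts, "Write") = (acc, some ts, none) := by
        simp [aStep]
      rw [List.foldl_cons, hstep, stateL2, segLifetimes_write]
      simp [segLast, List.append_assoc]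
    · have hnb : (op == "Write") = false := by simpa using hw
      have hstep : aStep (acc, none, none) (ts, op) = (acc, none, none) := by
        by_cases hr : op = "Read" <;> simp [aStep, hnb, hw, hr]
      rw [List.foldl_cons, hstep, ih, segLifetimes_skip _ _ _ hnb]

theorem aLifetimes_eq (evl : List (Int × String)) : aLifetimes evl = segLifetimes evl := by
  simpa using stateL1 evl []

theorem groupKeys_nodup (events : List (Int × String × Int × Int)) :
    (groupEvents events).keys.Nodup := by
  unfold groupEvents
  exact PySem.Dict.nodup_keys_foldl_modify_key events
    (fun e => (e.2.2.1, e.2.2.2)) [] (fun _ e xs => xs ++ [(e.1, e.2.1)]) PySem.Dict.empty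
    PySem.Dict.nodup_keys_empty

-- ===== VERDICT (by name: the statement is the Claim_ definition above) =====
theorem compute_lifetimes_spec : Claim_equal_compute_lifetimes := by
  intro events _
  unfold Spec_compute_lifetimes compute_lifetimes compute_lifetimes_alt
  have hnd : ((groupEvents events).items.map (fun p => p.1)).Nodup := by
    have h := groupKeys_nodup events
    simp only [PySem.Dict.keys] at h
    exact h
  have hfresh := PySem.Dict.items_foldl_insert_fresh
    (groupEvents events).items (fun p => p.1) (fun p => aLifetimes p.2) PySem.Dict.empty
    (fun a _ => PySem.Dict.contains_empty _) hnd
  have hempty : (PySem.Dict.empty : PySem.Dict (Int × Int) (List Int)).items = [] := rfl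
  simp only [hfresh, hempty, List.nil_append, List.map_map]
  exact List.map_congr_left (fun a _ => by simp only [Function.comp_apply, aLifetimes_eq])
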